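-- pv_equiv track=rewrite | github.com/pypi-data/pypi-mirror-21 | packages/oddt/oddt-0.3.3.tar.gz/oddt-0.3.3/oddt/toolkits/rdk.py | _compressbits
-- ===== SOURCE A (Python) =====
-- def _compressbits(bitvector, wordsize=32):
--     """Compress binary vector into vector of long ints.
--
--     This function is used by the Fingerprint class.
--
--     >>> _compressbits([0, 1, 0, 0, 0, 1], 2)
--     [2, 0, 2]
--     """
--     ans = []
--     for start in range(0, len(bitvector), wordsize):
--         compressed = 0
--         for i in range(wordsize):
--             if i + start < len(bitvector) and bitvector[i + start]:
--                 compressed += 2**i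
--         ans.append(compressed)
--
--     return ans
-- ===== SOURCE B (Python) =====
-- def _compressbits(bitvector, wordsize=32):
--     """Compress binary vector into vector of long ints.
--
--     Single flat scan: pre-allocate the word list (chunk count taken from the
--     same range call as the original), then scatter each truthy bit into its
--     word via divmod index arithmetic.
--     """
--     num_words = len(range(0, len(bitvector), wordsize))
--     ans = [0] * num_words
--     for idx, bit in enumerate(bitvector[:num_words * wordsize]):
--         if bit:
--             word, pos = divmod(idx, wordsize)
--             ans[word] += 2 ** pos
--     return ans
-- ===== Notes on version B (the rewrite author's own statement) =====
-- stated objective: alternative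
-- what changed: Replaces A's nested chunk/bit loops (one inner pass of wordsize iterations per chunk) by a single flat scan over enumerate(bitvector) that scatters each truthy bit into a pre-allocated zero-filled word list via divmod index arithmetic; num_words is taken from the same range call so empty, negative and zero wordsize behaviour is unchanged.
import Mathlib
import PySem

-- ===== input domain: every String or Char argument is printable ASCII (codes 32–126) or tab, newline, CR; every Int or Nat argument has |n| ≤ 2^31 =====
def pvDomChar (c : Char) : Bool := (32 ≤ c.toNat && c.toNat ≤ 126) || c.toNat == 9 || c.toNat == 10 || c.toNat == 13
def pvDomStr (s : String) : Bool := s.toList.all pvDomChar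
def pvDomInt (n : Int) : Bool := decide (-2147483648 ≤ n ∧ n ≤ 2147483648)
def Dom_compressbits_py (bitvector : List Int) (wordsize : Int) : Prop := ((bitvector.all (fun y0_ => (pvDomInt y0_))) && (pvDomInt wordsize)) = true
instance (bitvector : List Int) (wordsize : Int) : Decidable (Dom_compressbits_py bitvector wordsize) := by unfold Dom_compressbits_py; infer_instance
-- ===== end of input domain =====

-- B replaces A's nested chunk/bit loops by one flat scan over enumerate(bitvector) that
-- scatters each truthy bit into a pre-allocated word list via divmod index arithmetic
-- (objective: alternative decomposition, same asymptotic cost).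


-- ===== PORT A =====
def compressbits_py (bitvector : List Int) (wordsize : Int) : List Int :=
  (PySem.List.pyRange 0 (PySem.List.len bitvector) wordsize).foldl
    (fun ans start =>
      ans ++ [(PySem.List.pyRange 0 wordsize 1).foldl
        (fun compressed i =>
          if i + start < PySem.List.len bitvector ∧ PySem.List.pyGetD bitvector (i + start) 0 ≠ 0
          then compressed + 2 ^ i.toNat else compressed) 0]) []

-- ===== PORT B =====
def compressbits_py_alt (bitvector : List Int) (wordsize : Int) : List Int :=
  let numWords := (PySem.List.pyRange 0 (PySem.List.len bitvector) wordsize).length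
  (PySem.List.enumerate (PySem.List.slice bitvector none (some ((numWords : Int) * wordsize)))).foldl
    (fun ans p =>
      if p.2 ≠ 0 then
        PySem.List.pySetD ans (PySem.Int.floordiv p.1 wordsize)
          (PySem.List.pyGetD ans (PySem.Int.floordiv p.1 wordsize) 0
            + 2 ^ (PySem.Int.mod p.1 wordsize).toNat)
      else ans)
    (List.replicate numWords 0)

-- ===== PRECONDITION & SPEC =====
-- Pre_ excludes only wordsize = 0, where both Pythons raise ValueError from range(0, len, 0).
def Pre_compressbits_py (bitvector : List Int) (wordsize : Int) : Prop := wordsize ≠ 0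
instance (bitvector : List Int) (wordsize : Int) : Decidable (Pre_compressbits_py bitvector wordsize) := by unfold Pre_compressbits_py; infer_instance
def pvWitness_compressbits_py : List Int × Int := ([0, 1, 0, 0, 0, 1], 2)

def Spec_compressbits_py (bitvector : List Int) (wordsize : Int) (out : List Int) : Prop := out = compressbits_py_alt bitvector wordsize
instance (bitvector : List Int) (wordsize : Int) (out : List Int) : Decidable (Spec_compressbits_py bitvector wordsize out) := by unfold Spec_compressbits_py; infer_instance

-- ===== CLAIM (what is proved, stated in full; the proofs are below) =====
def Claim_equal_compressbits_py : Prop := ∀ (bitvector : List Int) (wordsize : Int), Dom_compressbits_py bitvector wordsize → Pre_compressbits_py bitvector wordsize → Spec_compressbits_py bitvector wordsize (compressbits_py bitvector wordsize)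

-- ===== LEMMAS AND PROOFS =====

-- number of words: ceil(n / W) for W > 0
def nWords (n W : Nat) : Nat := (n + W - 1) / W

-- the value of word k in the canonical (chunked) reading
def wsum (bv : List Int) (W k : Nat) : Int :=
  ∑ j ∈ Finset.range W, if j + W * k < bv.length ∧ bv.getD (j + W * k) 0 ≠ 0 then (2:Int) ^ j else 0

lemma nWords_count (n W : Nat) (hW : 0 < W) :
    (if (0:Int) < (n:Int) then (((n:Int) - 0 + (W:Int) - 1) / (W:Int)).toNat else 0) = nWords n W := by
  by_cases hn : 0 < n
  · rw [if_pos (by exact_mod_cast hn)]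
    have h1 : ((n:Int) - 0 + (W:Int) - 1) = ((n + W - 1 : Nat) : Int) := by omega
    rw [h1, ← Int.natCast_div, Int.toNat_natCast, nWords]
  · rw [if_neg (by omega)]
    have hn0 : n = 0 := by omega
    subst hn0
    unfold nWords
    exact (Nat.div_eq_of_lt (by omega)).symm

lemma le_nWords_mul (n W : Nat) (hW : 0 < W) : n ≤ nWords n W * W := by
  rcases Nat.eq_zero_or_pos n with h | h
  · simp [h]
  · have hN : nWords n W = (n - 1) / W + 1 := by
      unfold nWords
      have : n + W - 1 = (n - 1) + W := by omega
      rw [this, Nat.add_div_right _ hW]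
    rw [hN]
    have key : n - 1 < ((n - 1) / W + 1) * W := (Nat.div_lt_iff_lt_mul hW).mp (Nat.lt_succ_self _)
    omega

lemma div_lt_nWords (n W i : Nat) (hW : 0 < W) (hi : i < n) : i / W < nWords n W := by
  have hN : nWords n W = (n - 1) / W + 1 := by
    unfold nWords
    have : n + W - 1 = (n - 1) + W := by omega
    rw [this, Nat.add_div_right _ hW]
  have : i / W ≤ (n - 1) / W := Nat.div_le_div_right (by omega)
  omega

-- a guarded accumulating loop over range W is a Finset sum
lemma foldl_ite_add_eq_sum (W : Nat) (g : Nat → Int) (P : Nat → Prop) [DecidablePred P] :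
    (List.range W).foldl (fun c j => if P j then c + g j else c) 0
      = ∑ j ∈ Finset.range W, if P j then g j else 0 := by
  induction W with
  | zero => simp
  | succ W ih =>
      rw [List.range_succ, List.foldl_append, Finset.sum_range_succ, ih]
      simp only [List.foldl_cons, List.foldl_nil]
      split_ifs <;> simp

-- A's result is the map of per-word sums over the word indices
lemma A_norm (bv : List Int) (W : Nat) (hW : 0 < W) :
    compressbits_py bv (W:Int) = (List.range (nWords bv.length W)).map (fun k => wsum bv W k) := by
  unfold compressbits_py
  rw [PySem.List.foldl_append_singleton_eq_map, List.nil_append]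
  have hlen : PySem.List.len bv = (bv.length : Int) := rfl
  rw [hlen, PySem.List.pyRange_of_pos 0 (bv.length : Int) (by exact_mod_cast hW),
      nWords_count bv.length W hW, List.map_map]
  refine List.map_congr_left (fun k hk => ?_)
  simp only [Function.comp_apply]
  rw [PySem.List.pyRange_one, List.foldl_map]
  have hrange : ((W:Int) - 0).toNat = W := by omega
  rw [hrange]
  have hbody : ∀ (c : Int) (j : Nat),
      (if ((0:Int) + (j:Int)) + (0 + (W:Int) * (k:Int)) < (bv.length : Int) ∧
          PySem.List.pyGetD bv (((0:Int) + (j:Int)) + (0 + (W:Int) * (k:Int))) 0 ≠ 0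
        then c + 2 ^ ((0:Int) + (j:Int)).toNat else c)
      = if j + W * k < bv.length ∧ bv.getD (j + W * k) 0 ≠ 0 then c + (2:Int) ^ j else c := by
    intro c j
    have hcast : ((0:Int) + (j:Int)) + (0 + (W:Int) * (k:Int)) = ((j + W * k : Nat) : Int) := by
      push_cast; ring
    rw [hcast]
    have hcond : (((j + W * k : Nat) : Int) < (bv.length : Int) ∧
        PySem.List.pyGetD bv ((j + W * k : Nat) : Int) 0 ≠ 0)
        ↔ (j + W * k < bv.length ∧ bv.getD (j + W * k) 0 ≠ 0) := by
      rw [PySem.List.pyGetD_natCast]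
      exact and_congr (by exact_mod_cast Iff.rfl) Iff.rfl
    have h2 : ((0:Int) + (j:Int)).toNat = j := by omega
    rw [h2, if_congr hcond rfl rfl]
  have hfold := PySem.List.foldl_congr_mem' (l := List.range W) (init := (0:Int))
    (f := fun c j => if ((0:Int) + (j:Int)) + (0 + (W:Int) * (k:Int)) < (bv.length : Int) ∧
          PySem.List.pyGetD bv (((0:Int) + (j:Int)) + (0 + (W:Int) * (k:Int))) 0 ≠ 0
        then c + 2 ^ ((0:Int) + (j:Int)).toNat else c)
    (g := fun c j => if j + W * k < bv.length ∧ bv.getD (j + W * k) 0 ≠ 0 then c + (2:Int) ^ j else c)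
    (fun j _ c => hbody c j)
  rw [hfold, foldl_ite_add_eq_sum]
  rfl

-- B's scatter step (with a positive word size W), as in port B's loop body
def scat (W : Nat) : List Int → Int × Int → List Int := fun ans p =>
  if p.2 ≠ 0 then
    PySem.List.pySetD ans (PySem.Int.floordiv p.1 (W:Int))
      (PySem.List.pyGetD ans (PySem.Int.floordiv p.1 (W:Int)) 0
        + 2 ^ (PySem.Int.mod p.1 (W:Int)).toNat)
  else ans

-- B's scatter fold, characterized elementwise
lemma fold_scatter (W : Nat) (xs : List Int) : ∀ (ans : List Int),
    (∀ i, i < xs.length → i / W < ans.length) →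
    ((PySem.List.enumerate xs).foldl (scat W) ans).length = ans.length ∧
    ∀ k, k < ans.length →
      ((PySem.List.enumerate xs).foldl (scat W) ans).getD k 0
        = ans.getD k 0 + ∑ i ∈ Finset.range xs.length,
            if i / W = k ∧ xs.getD i 0 ≠ 0 then (2:Int) ^ (i % W) else 0 := by
  induction xs using List.reverseRecOn with
  | nil =>
      intro ans _
      simp [PySem.List.enumerate_nil]
  | append_singleton xs x ih =>
      intro ans h2
      have hx2 : ∀ i, i < xs.length → i / W < ans.length := fun i hi =>
        h2 i (by rw [List.length_append, List.length_singleton]; omega)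
      obtain ⟨ihlen, ihget⟩ := ih ans hx2
      have hwlt : xs.length / W < ans.length := h2 xs.length (by simp)
      have henum : PySem.List.enumerate (xs ++ [x])
          = PySem.List.enumerate xs ++ [((xs.length : Int), x)] := by
        rw [PySem.List.enumerate_append]
        simp [PySem.List.enumerate_cons, PySem.List.enumerate_nil]
      rw [henum, List.foldl_append]
      have hmid : ∀ i, i < xs.length → (xs ++ [x]).getD i 0 = xs.getD i 0 := by
        intro i hi
        simp [List.getD_eq_getElem?_getD, List.getElem?_append_left hi]
      have hlast : (xs ++ [x]).getD xs.length 0 = x := by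
        simp [List.getD_eq_getElem?_getD]
      have hsum : ∀ k, ∑ i ∈ Finset.range (xs ++ [x]).length,
            (if i / W = k ∧ (xs ++ [x]).getD i 0 ≠ 0 then (2:Int) ^ (i % W) else 0)
          = (∑ i ∈ Finset.range xs.length,
              (if i / W = k ∧ xs.getD i 0 ≠ 0 then (2:Int) ^ (i % W) else 0))
            + (if xs.length / W = k ∧ x ≠ 0 then (2:Int) ^ (xs.length % W) else 0) := by
        intro k
        rw [List.length_append, List.length_singleton, Finset.sum_range_succ, hlast]
        congr 1
        refine Finset.sum_congr rfl (fun i hi => ?_)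
        rw [hmid i (Finset.mem_range.mp hi)]
      by_cases hx : x = 0
      · have hstep : List.foldl (scat W) ((PySem.List.enumerate xs).foldl (scat W) ans)
            [((xs.length : Int), x)] = (PySem.List.enumerate xs).foldl (scat W) ans := by
          simp [scat, hx]
        rw [hstep]
        refine ⟨ihlen, fun k hk => ?_⟩
        rw [ihget k hk, hsum k, if_neg (by simp [hx])]
        ring
      · set R := (PySem.List.enumerate xs).foldl (scat W) ans with hR
        set q := xs.length / W with hq
        set v := R.getD q 0 + (2:Int) ^ (xs.length % W) with hv
        have hstep : List.foldl (scat W) R [((xs.length : Int), x)] = R.set q v := by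
          simp only [List.foldl_cons, List.foldl_nil, scat]
          rw [if_pos hx]
          rw [PySem.Int.floordiv_natCast, PySem.Int.mod_natCast,
              PySem.List.pySetD_natCast, PySem.List.pyGetD_natCast]
          have hmodt : (((xs.length:Int)) % ((W:Nat):Int)).toNat = xs.length % W := by omega
          simp [hq, hv, hmodt]
        rw [hstep]
        have hqR : q < R.length := by rw [ihlen]; exact hwlt
        have hget : ∀ k : Nat, (R.set q v).getD k 0 = if k = q then v else R.getD k 0 := by
          intro k
          have := PySem.List.pyGetD_pySetD_natCast R q k v 0 hqR
          simpa using this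
        refine ⟨by rw [List.length_set, ihlen], fun k hk => ?_⟩
        rw [hget k, hsum k]
        by_cases hkq : k = q
        · rw [if_pos hkq, if_pos ⟨hkq.symm, hx⟩, hv, hkq, ihget q hwlt]
          ring
        · rw [if_neg hkq, if_neg (fun h => hkq (h.1.symm)), ihget k hk]
          ring

-- reindexing: the scattered contributions to word k are exactly chunk k's bits
lemma chunk_sum_aux (W k : Nat) (hW : 0 < W) (c : Nat → Prop) [DecidablePred c] : ∀ (m : Nat),
    (∑ i ∈ Finset.range m, if i / W = k ∧ c i then (2:Int) ^ (i % W) else 0)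
      = ∑ j ∈ Finset.range W, if j + W * k < m ∧ c (j + W * k) then (2:Int) ^ j else 0 := by
  intro m
  induction m with
  | zero =>
      simp
  | succ m ih =>
      rw [Finset.sum_range_succ, ih]
      have hsplit : ∀ j ∈ Finset.range W,
          (if j + W * k < m + 1 ∧ c (j + W * k) then (2:Int) ^ j else 0)
          = (if j + W * k < m ∧ c (j + W * k) then (2:Int) ^ j else 0)
            + (if j + W * k = m ∧ c m then (2:Int) ^ j else 0) := by
        intro j _
        by_cases he : j + W * k = m
        · rw [he]
          by_cases hc : c m <;> simp [hc]
        · have h1 : (j + W * k < m + 1 ∧ c (j + W * k)) ↔ (j + W * k < m ∧ c (j + W * k)) :=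
            and_congr (by omega) Iff.rfl
          rw [show (if j + W * k = m ∧ c m then (2:Int) ^ j else 0) = 0 from
                if_neg (fun hh => he hh.1),
              add_zero, if_congr h1 rfl rfl]
      rw [Finset.sum_congr rfl hsplit, Finset.sum_add_distrib]
      congr 1
      by_cases hc : c m
      · simp only [hc, and_true]
        by_cases hk : m / W = k
        · have hdm := Nat.div_add_mod m W
          rw [hk] at hdm
          have hmod : ∀ j, (j + W * k = m) ↔ (j = m % W) := by intro j; omega
          rw [if_pos hk]
          symm
          calc ∑ j ∈ Finset.range W, (if j + W * k = m then (2:Int) ^ j else 0)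
              = ∑ j ∈ Finset.range W, (if j = m % W then (2:Int) ^ j else 0) :=
                Finset.sum_congr rfl (fun j _ => if_congr (hmod j) rfl rfl)
            _ = (2:Int) ^ (m % W) := by
                rw [Finset.sum_ite_eq' (Finset.range W) (m % W) (fun j => (2:Int) ^ j)]
                rw [if_pos (Finset.mem_range.mpr (Nat.mod_lt m hW))]
        · rw [if_neg hk]
          symm
          apply Finset.sum_eq_zero
          intro j hj
          rw [if_neg]
          intro h
          apply hk
          rw [← h, Nat.mul_comm W k, Nat.add_mul_div_right _ _ hW,
              Nat.div_eq_of_lt (Finset.mem_range.mp hj)]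
          omega
      · simp [hc]

lemma range_len (n W : Nat) (hW : 0 < W) :
    (PySem.List.pyRange 0 (n:Int) (W:Int)).length = nWords n W := by
  rw [PySem.List.pyRange_of_pos 0 (n:Int) (by exact_mod_cast hW), List.length_map,
      List.length_range, nWords_count n W hW]

lemma pos_case (bv : List Int) (W : Nat) (hW : 0 < W) :
    compressbits_py bv (W:Int) = compressbits_py_alt bv (W:Int) := by
  have hlenbv : PySem.List.len bv = (bv.length : Int) := rfl
  have hN := range_len bv.length W hW
  rw [A_norm bv W hW]
  unfold compressbits_py_alt
  rw [hlenbv, hN]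
  show List.map (fun k => wsum bv W k) (List.range (nWords bv.length W)) =
    List.foldl (fun (ans : List Int) (p : Int × Int) =>
        if p.2 ≠ 0 then
          PySem.List.pySetD ans (PySem.Int.floordiv p.1 (W:Int))
            (PySem.List.pyGetD ans (PySem.Int.floordiv p.1 (W:Int)) 0
              + 2 ^ (PySem.Int.mod p.1 (W:Int)).toNat)
        else ans)
      (List.replicate (nWords bv.length W) 0)
      (PySem.List.enumerate (PySem.List.slice bv none
        (some (((nWords bv.length W : Nat) : Int) * (W:Int)))))
  have hcast : (((nWords bv.length W) : Nat) : Int) * (W:Int)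
      = ((nWords bv.length W * W : Nat) : Int) := by push_cast; ring
  rw [hcast, PySem.List.slice_to bv (Int.natCast_nonneg _), Int.toNat_natCast,
      List.take_of_length_le (le_nWords_mul bv.length W hW)]
  have hscat : (fun (ans : List Int) (p : Int × Int) =>
      if p.2 ≠ 0 then
        PySem.List.pySetD ans (PySem.Int.floordiv p.1 (W:Int))
          (PySem.List.pyGetD ans (PySem.Int.floordiv p.1 (W:Int)) 0
            + 2 ^ (PySem.Int.mod p.1 (W:Int)).toNat)
      else ans) = scat W := rfl
  rw [hscat]
  obtain ⟨hlen, hget⟩ := fold_scatter W bv (List.replicate (nWords bv.length W) 0)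
    (fun i hi => by rw [List.length_replicate]; exact div_lt_nWords bv.length W i hW hi)
  apply List.ext_getElem
  · rw [List.length_map, List.length_range, hlen, List.length_replicate]
  · intro k h1 h2
    rw [List.getElem_map, List.getElem_range]
    have hk : k < nWords bv.length W := by
      rw [List.length_map, List.length_range] at h1; exact h1
    rw [← List.getD_eq_getElem _ 0 h2, hget k (by rw [List.length_replicate]; exact hk)]
    rw [List.getD_replicate]
    rw [chunk_sum_aux W k hW (fun i => bv.getD i 0 ≠ 0) bv.length]
    simp [wsum]
    exact hk

lemma neg_case (bv : List Int) (w : Int) (hw : w < 0) :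
    compressbits_py bv w = compressbits_py_alt bv w := by
  have hlenbv : PySem.List.len bv = (bv.length : Int) := rfl
  unfold compressbits_py compressbits_py_alt
  rw [hlenbv, PySem.List.pyRange_of_neg (0:Int) (bv.length : Int) hw,
      if_neg (not_lt.mpr (Int.natCast_nonneg _))]
  simp [PySem.List.slice_to bv (le_refl (0:Int)), PySem.List.enumerate_nil]

-- ===== VERDICT (by name: the statement is the Claim_ definition above) =====
theorem compressbits_py_spec : Claim_equal_compressbits_py := by
  intro bv w _ hpre
  unfold Spec_compressbits_py
  rcases lt_or_gt_of_ne hpre with hw | hw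
  · exact neg_case bv w hw
  · have hW : w = ((w.toNat : Nat) : Int) := by omega
    rw [hW]
    exact pos_case bv w.toNat (by omega)
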